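-- pv_equiv track=rewrite | github.com/sligara7/dnd_creator | backend6/core/utils/dice_notation.py | suggest_dice_notation
-- ===== SOURCE A (Python) =====
-- from typing import Dict, List, Optional, Tuple, Union, Any, NamedTuple
--
-- def suggest_dice_notation(description: str) -> List[str]:
--     """
--     Suggest dice notation based on natural language description.
--
--     Args:
--         description: Natural language description
--
--     Returns:
--         List of suggested dice notations
--
--     Examples:
--         >>> suggest_dice_notation("sword damage")
--         ["1d8", "1d8+STR", "2d6"]
--         >>> suggest_dice_notation("fireball damage")
--         ["8d6", "6d6", "10d6"]
--     """
--     suggestions = []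
--     desc_lower = description.lower()
--
--     # Common D&D damage patterns
--     if any(weapon in desc_lower for weapon in ['sword', 'blade', 'slash']):
--         suggestions.extend(["1d8", "1d8+STR", "1d6+STR"])
--
--     if any(weapon in desc_lower for weapon in ['bow', 'arrow', 'shot']):
--         suggestions.extend(["1d8+DEX", "1d6+DEX"])
--
--     if any(spell in desc_lower for spell in ['fireball', 'lightning', 'fire']):
--         suggestions.extend(["8d6", "6d6", "10d6"])
--
--     if any(heal in desc_lower for heal in ['heal', 'cure', 'restore']):
--         suggestions.extend(["1d8+WIS", "2d4+WIS", "1d4+WIS"])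
--
--     if 'attack' in desc_lower:
--         suggestions.extend(["1d20+STR", "1d20+DEX", "1d20+PROF"])
--
--     if 'save' in desc_lower:
--         suggestions.extend(["1d20+CON", "1d20+WIS", "1d20+DEX"])
--
--     # Default suggestions if nothing matches
--     if not suggestions:
--         suggestions = ["1d20", "1d8", "1d6", "1d4", "2d6"]
--
--     return suggestions[:10]  # Limit to top 10 suggestions
-- ===== SOURCE B (Python) =====
-- # Single left-to-right scan of the text: at each position test which keyword
-- # starts there (a mini string-matching sweep), collect the matched rule ids,
-- # then emit the notations of the matched rules in rule order.
-- KEYWORD_RULE = [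
--     ("sword", 0), ("blade", 0), ("slash", 0),
--     ("bow", 1), ("arrow", 1), ("shot", 1),
--     ("fireball", 2), ("lightning", 2), ("fire", 2),
--     ("heal", 3), ("cure", 3), ("restore", 3),
--     ("attack", 4), ("save", 5),
-- ]
-- NOTATIONS = [
--     ["1d8", "1d8+STR", "1d6+STR"],
--     ["1d8+DEX", "1d6+DEX"],
--     ["8d6", "6d6", "10d6"],
--     ["1d8+WIS", "2d4+WIS", "1d4+WIS"],
--     ["1d20+STR", "1d20+DEX", "1d20+PROF"],
--     ["1d20+CON", "1d20+WIS", "1d20+DEX"],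
-- ]
-- DEFAULTS = ["1d20", "1d8", "1d6", "1d4", "2d6"]
--
--
-- def suggest_dice_notation(description: str):
--     d = description.lower()
--     matched = set()
--     for i in range(len(d)):
--         for kw, r in KEYWORD_RULE:
--             if d.startswith(kw, i):
--                 matched.add(r)
--     out = [n for r, nots in enumerate(NOTATIONS) if r in matched for n in nots]
--     return out[:10] if out else DEFAULTS
-- ===== Notes on version B (the rewrite author's own statement) =====
-- stated objective: alternative
-- what changed: Instead of six independent substring searches, B makes one left-to-right sweep over the lowered text testing at each position which keyword starts there, collects matched rule ids in a set, and then emits the notations of matched rules in rule order (with the same default and [:10] cap).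
import Mathlib
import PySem

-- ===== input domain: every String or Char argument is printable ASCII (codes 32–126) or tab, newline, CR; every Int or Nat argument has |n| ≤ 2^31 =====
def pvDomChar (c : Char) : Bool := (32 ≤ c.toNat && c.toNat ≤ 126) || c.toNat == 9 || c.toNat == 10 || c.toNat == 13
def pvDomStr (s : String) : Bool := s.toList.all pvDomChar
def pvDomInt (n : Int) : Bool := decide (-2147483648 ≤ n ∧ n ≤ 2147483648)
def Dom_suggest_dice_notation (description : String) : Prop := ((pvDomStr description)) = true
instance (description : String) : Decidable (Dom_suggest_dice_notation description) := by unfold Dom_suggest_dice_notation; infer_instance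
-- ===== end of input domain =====

-- B replaces A's six independent substring searches by one left-to-right positional sweep
-- collecting matched rule ids in a set, then emits notations per rule (alternative, same cost).

-- ===== PORT A =====
def suggest_dice_notation (description : String) : List String :=
  let desc_lower := PySem.Str.lower description
  let suggestions : List String := []
  let suggestions := if ["sword", "blade", "slash"].any (fun w => PySem.Str.isIn w desc_lower)
    then suggestions ++ ["1d8", "1d8+STR", "1d6+STR"] else suggestions
  let suggestions := if ["bow", "arrow", "shot"].any (fun w => PySem.Str.isIn w desc_lower)
    then suggestions ++ ["1d8+DEX", "1d6+DEX"] else suggestions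
  let suggestions := if ["fireball", "lightning", "fire"].any (fun w => PySem.Str.isIn w desc_lower)
    then suggestions ++ ["8d6", "6d6", "10d6"] else suggestions
  let suggestions := if ["heal", "cure", "restore"].any (fun w => PySem.Str.isIn w desc_lower)
    then suggestions ++ ["1d8+WIS", "2d4+WIS", "1d4+WIS"] else suggestions
  let suggestions := if PySem.Str.isIn "attack" desc_lower
    then suggestions ++ ["1d20+STR", "1d20+DEX", "1d20+PROF"] else suggestions
  let suggestions := if PySem.Str.isIn "save" desc_lower
    then suggestions ++ ["1d20+CON", "1d20+WIS", "1d20+DEX"] else suggestions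
  let suggestions := if suggestions = [] then ["1d20", "1d8", "1d6", "1d4", "2d6"] else suggestions
  PySem.List.slice suggestions none (some 10)

-- ===== PORT B =====
def pvKeywordRule : List (String × Int) :=
  [ ("sword", 0), ("blade", 0), ("slash", 0),
    ("bow", 1), ("arrow", 1), ("shot", 1),
    ("fireball", 2), ("lightning", 2), ("fire", 2),
    ("heal", 3), ("cure", 3), ("restore", 3),
    ("attack", 4), ("save", 5) ]

def pvNotations : List (List String) :=
  [ ["1d8", "1d8+STR", "1d6+STR"],
    ["1d8+DEX", "1d6+DEX"],
    ["8d6", "6d6", "10d6"],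
    ["1d8+WIS", "2d4+WIS", "1d4+WIS"],
    ["1d20+STR", "1d20+DEX", "1d20+PROF"],
    ["1d20+CON", "1d20+WIS", "1d20+DEX"] ]

def pvDefaults : List String := ["1d20", "1d8", "1d6", "1d4", "2d6"]

-- d.startswith(kw, i): exact for 0 ≤ i (ported by hand, PySem has no offset startswith)
def pvStartsAt (d : List Char) (kw : String) (i : Nat) : Bool :=
  kw.toList.isPrefixOf (d.drop i)

def suggest_dice_notation_alt (description : String) : List String :=
  let d := (PySem.Str.lower description).toList
  let matched : PySem.Set Int :=
    (List.range d.length).foldl (fun m i =>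
      pvKeywordRule.foldl (fun m kr =>
        if pvStartsAt d kr.1 i then PySem.Set.add m kr.2 else m) m)
      PySem.Set.empty
  let out := (PySem.List.enumerate pvNotations 0).flatMap
      (fun p => if PySem.Set.contains matched p.1 then p.2 else [])
  if out = [] then pvDefaults else PySem.List.slice out none (some 10)

-- ===== PRECONDITION & SPEC =====
def Spec_suggest_dice_notation (description : String) (out : List String) : Prop := out = suggest_dice_notation_alt description
instance (description : String) (out : List String) : Decidable (Spec_suggest_dice_notation description out) := by unfold Spec_suggest_dice_notation; infer_instance

-- ===== CLAIM (what is proved, stated in full; the proofs are below) =====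
def Claim_equal_suggest_dice_notation : Prop := ∀ (description : String), Dom_suggest_dice_notation description → Spec_suggest_dice_notation description (suggest_dice_notation description)

-- ===== LEMMAS AND PROOFS =====

-- membership in an add-if fold over any list
theorem mem_foldl_addif {α : Type} (l : List α) (f : α → Bool) (g : α → Int)
    (m : PySem.Set Int) (r : Int) :
    r ∈ l.foldl (fun m a => if f a then PySem.Set.add m (g a) else m) m ↔
      r ∈ m ∨ ∃ a ∈ l, f a = true ∧ g a = r := by
  induction l generalizing m with
  | nil => simp
  | cons x xs ih =>
    simp only [List.foldl_cons]
    by_cases hx : f x = true <;>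
      simp only [hx, if_true, ih, PySem.Set.mem_add, List.mem_cons] <;>
      constructor
    · rintro ((h | h) | ⟨a, ha, hf, hg⟩)
      · exact Or.inl h
      · exact Or.inr ⟨x, Or.inl rfl, hx, h.symm⟩
      · exact Or.inr ⟨a, Or.inr ha, hf, hg⟩
    · rintro (h | ⟨a, (rfl | ha), hf, hg⟩)
      · exact Or.inl (Or.inl h)
      · exact Or.inl (Or.inr hg.symm)
      · exact Or.inr ⟨a, ha, hf, hg⟩
    · rintro (h | ⟨a, ha, hf, hg⟩)
      · exact Or.inl h
      · exact Or.inr ⟨a, Or.inr ha, hf, hg⟩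
    · rintro (h | ⟨a, (rfl | ha), hf, hg⟩)
      · exact Or.inl h
      · exact absurd hf hx
      · exact Or.inr ⟨a, ha, hf, hg⟩

-- membership in the nested positional sweep
theorem mem_sweep (d : List Char) (r : Int) (m : PySem.Set Int) :
    r ∈ (List.range d.length).foldl (fun m i =>
      pvKeywordRule.foldl (fun m kr =>
        if pvStartsAt d kr.1 i then PySem.Set.add m kr.2 else m) m) m ↔
      r ∈ m ∨ ∃ i ∈ List.range d.length, ∃ kr ∈ pvKeywordRule, pvStartsAt d kr.1 i = true ∧ kr.2 = r := by
  induction (List.range d.length) generalizing m with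
  | nil => simp
  | cons x xs ih =>
    simp only [List.foldl_cons, ih, List.mem_cons, mem_foldl_addif]
    constructor
    · rintro ((h | ⟨a, ha, hf, hg⟩) | ⟨i, hi, h⟩)
      · exact Or.inl h
      · exact Or.inr ⟨x, Or.inl rfl, a, ha, hf, hg⟩
      · exact Or.inr ⟨i, Or.inr hi, h⟩
    · rintro (h | ⟨i, (rfl | hi), h⟩)
      · exact Or.inl (Or.inl h)
      · exact Or.inl (Or.inr h)
      · exact Or.inr ⟨i, hi, h⟩

-- a nonempty keyword occurs at some scanned position iff it is an infix
theorem exists_startsAt_iff (d : List Char) (kw : String) (h : kw.toList ≠ []) :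
    (∃ i ∈ List.range d.length, pvStartsAt d kw i = true) ↔
      PySem.Chars.isIn kw.toList d = true := by
  rw [← PySem.Chars.exists_prefix_drop_iff_isIn]
  constructor
  · rintro ⟨i, _, hp⟩
    exact ⟨i, List.isPrefixOf_iff_prefix.mp hp⟩
  · rintro ⟨j, hj⟩
    by_cases hcase : j < d.length
    · exact ⟨j, List.mem_range.mpr hcase, List.isPrefixOf_iff_prefix.mpr hj⟩
    · exfalso
      rw [List.drop_eq_nil_of_le (by omega)] at hj
      exact h (List.prefix_nil.mp hj)

-- the sweep's contains test, expressed through the keyword table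
theorem contains_sweep (dl : List Char) (r : Int) :
    PySem.Set.contains ((List.range dl.length).foldl (fun m i =>
      pvKeywordRule.foldl (fun m kr =>
        if pvStartsAt dl kr.1 i then PySem.Set.add m kr.2 else m) m) PySem.Set.empty) r
    = pvKeywordRule.any (fun kr => decide (kr.2 = r) && PySem.Chars.isIn kr.1.toList dl) := by
  rw [Bool.eq_iff_iff, PySem.Set.contains_iff, mem_sweep, List.any_eq_true]
  simp only [PySem.Set.empty]
  constructor
  · rintro (h | ⟨i, hi, kr, hkr, hs, hg⟩)
    · simp at h
    · exact ⟨kr, hkr, by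
        have := (exists_startsAt_iff dl kr.1 (by fin_cases hkr <;> decide)).mp ⟨i, hi, hs⟩
        simp [hg, this]⟩
  · rintro ⟨kr, hkr, hb⟩
    simp only [Bool.and_eq_true, decide_eq_true_eq] at hb
    obtain ⟨i, hi, hs⟩ := (exists_startsAt_iff dl kr.1 (by fin_cases hkr <;> decide)).mpr hb.2
    exact Or.inr ⟨i, hi, kr, hkr, hs, hb.1⟩

-- ===== VERDICT (by name: the statement is the Claim_ definition above) =====
theorem suggest_dice_notation_spec : Claim_equal_suggest_dice_notation := by
  intro description _
  unfold Spec_suggest_dice_notation suggest_dice_notation suggest_dice_notation_alt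
  simp only [contains_sweep]
  simp only [pvNotations, PySem.List.enumerate_cons, PySem.List.enumerate_nil,
    List.flatMap_cons, List.flatMap_nil, List.append_nil, pvKeywordRule, List.any_cons, List.any_nil,
    Int.reduceAdd, Int.reduceEq, decide_true, decide_false, Bool.true_and, Bool.false_and,
    Bool.or_false, Bool.false_or, PySem.Str.isIn_eq]
  generalize (PySem.Chars.isIn "sword".toList (PySem.Str.lower description).toList || (PySem.Chars.isIn "blade".toList (PySem.Str.lower description).toList || PySem.Chars.isIn "slash".toList (PySem.Str.lower description).toList)) = b1
  generalize (PySem.Chars.isIn "bow".toList (PySem.Str.lower description).toList || (PySem.Chars.isIn "arrow".toList (PySem.Str.lower description).toList || PySem.Chars.isIn "shot".toList (PySem.Str.lower description).toList)) = b2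
  generalize (PySem.Chars.isIn "fireball".toList (PySem.Str.lower description).toList || (PySem.Chars.isIn "lightning".toList (PySem.Str.lower description).toList || PySem.Chars.isIn "fire".toList (PySem.Str.lower description).toList)) = b3
  generalize (PySem.Chars.isIn "heal".toList (PySem.Str.lower description).toList || (PySem.Chars.isIn "cure".toList (PySem.Str.lower description).toList || PySem.Chars.isIn "restore".toList (PySem.Str.lower description).toList)) = b4
  generalize PySem.Chars.isIn "attack".toList (PySem.Str.lower description).toList = b5
  generalize PySem.Chars.isIn "save".toList (PySem.Str.lower description).toList = b6
  cases b1 <;> cases b2 <;> cases b3 <;> cases b4 <;> cases b5 <;> cases b6 <;> decide
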